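-- pv_equiv track=rewrite | github.com/kdm1171/programmers | python/programmers/level2/P_괄호_변환.py | solution
-- ===== SOURCE A (Python) =====
-- def checkOk(p):
--     count = 0
--     for i in p:
--         if i == '(':
--             count += 1
--         else:
--             count -= 1
--         if count < 0:
--             return False
--     return True
--
-- def reverse(p):
--     reversed = []
--     for i in p:
--         if i == '(':
--             reversed.append(')')
--         else:
--             reversed.append('(')
--     return ''.join(reversed)
--
-- def solution(p):
--     if checkOk(p):
--         return p
--
--     count = 0
--     index = 0
--     for i, v in enumerate(p):
--         index += 1
--         if v == '(':
--             count += 1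
--         else:
--             count -= 1
--         if count == 0:
--             break
--     u = p[:index]
--     v = p[index:]
--
--     if checkOk(u):
--         return u + solution(v)
--     else:
--         s = '(' + solution(v) + ')'
--         return s + reverse(u[1:len(u) - 1])
-- ===== SOURCE B (Python) =====
-- def solution(p):
--     # one pass: split p into primitive components (running count returns to 0)
--     chunks = []
--     cur = []
--     cnt = 0
--     for ch in p:
--         cur.append(ch)
--         cnt += 1 if ch == '(' else -1
--         if cnt == 0:
--             chunks.append(''.join(cur))
--             cur = []
--     if cur:
--         chunks.append(''.join(cur))
--     # assemble right-to-left; a primitive chunk is "correct" iff it starts with '('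
--     pre = []
--     suf = []
--     for u in reversed(chunks):
--         if u[0] == '(':
--             pre.append(u)
--         else:
--             pre.append('(')
--             suf.append(')' + ''.join(')' if c == '(' else '(' for c in u[1:-1]))
--     return ''.join(reversed(pre)) + ''.join(suf)
-- ===== Notes on version B (the rewrite author's own statement) =====
-- stated objective: alternative
-- what changed: Replaces A's top-down recursion that re-runs checkOk on the remaining string at every level by a single pass splitting the input into primitive chunks (running count returning to 0) plus one right-to-left assembly pass over the chunks, using the fact that a primitive chunk passes checkOk iff it starts with an opening parenthesis.
import Mathlib
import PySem

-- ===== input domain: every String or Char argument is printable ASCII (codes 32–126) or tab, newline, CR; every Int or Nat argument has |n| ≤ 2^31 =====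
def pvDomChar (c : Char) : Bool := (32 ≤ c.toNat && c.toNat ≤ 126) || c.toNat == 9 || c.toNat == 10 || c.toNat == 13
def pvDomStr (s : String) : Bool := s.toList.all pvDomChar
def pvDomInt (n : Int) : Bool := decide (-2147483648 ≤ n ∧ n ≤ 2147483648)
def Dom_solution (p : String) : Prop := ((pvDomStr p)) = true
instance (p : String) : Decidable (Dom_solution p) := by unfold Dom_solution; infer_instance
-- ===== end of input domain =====

-- B restructures A: one split of the input into primitive chunks, then one right-to-left assembly pass over them (no recursion, no checkOk).

-- ===== PORT A =====
-- helper checkOk: running count, False as soon as it dips below zero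
def checkOkA : List Char → Int → Bool
  | [], _ => true
  | c :: rest, count =>
    let count' := count + (if c = '(' then 1 else -1)
    if count' < 0 then false else checkOkA rest count'

-- helper reverse: flip each parenthesis
def revA (l : List Char) : List Char := l.map (fun c => if c = '(' then ')' else '(')

-- the enumerate-loop of solution: number of chars consumed until the running count hits 0 (whole length if never)
def splitIdx : List Char → Int → Nat
  | [], _ => 0
  | c :: rest, count =>
    let count' := count + (if c = '(' then 1 else -1)
    if count' = 0 then 1 else splitIdx rest count' + 1

theorem splitIdx_cons (c : Char) (rest : List Char) (cnt : Int) :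
    splitIdx (c :: rest) cnt =
      if cnt + (if c = '(' then 1 else -1) = 0 then 1
      else splitIdx rest (cnt + (if c = '(' then 1 else -1)) + 1 := rfl

theorem splitIdx_pos (c : Char) (rest : List Char) (cnt : Int) : 1 ≤ splitIdx (c :: rest) cnt := by
  by_cases h : cnt + (if c = '(' then (1:Int) else -1) = 0
  · rw [splitIdx_cons, if_pos h]
  · rw [splitIdx_cons, if_neg h]; omega

def solutionL (p : List Char) : List Char :=
  if h : checkOkA p 0 then p
  else
    let idx := splitIdx p 0
    let u := p.take idx
    let v := p.drop idx
    if checkOkA u 0 then u ++ solutionL v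
    else '(' :: solutionL v ++ ')' :: revA ((u.drop 1).take (u.length - 2))
termination_by p.length
decreasing_by
  all_goals
  · cases p with
    | nil => simp [checkOkA] at h
    | cons c rest =>
      have := splitIdx_pos c rest 0
      simp only [List.length_drop, List.length_cons]
      omega

def solution (p : String) : String := String.ofList (solutionL p.toList)

-- ===== PORT B =====
-- single pass splitting p into primitive chunks (cur holds the chunk being built)
def chunksGo : List Char → Int → List Char → List (List Char)
  | [], _, cur => if cur.isEmpty then [] else [cur.reverse]
  | c :: rest, cnt, cur =>
    let cnt' := cnt + (if c = '(' then 1 else -1)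
    if cnt' = 0 then (c :: cur).reverse :: chunksGo rest 0 []
    else chunksGo rest cnt' (c :: cur)

def flipB (l : List Char) : List Char := l.map (fun c => if c = '(' then ')' else '(')

-- one assembly step of B's right-to-left loop on the (pre, suf) piece lists
def stepB (st : List (List Char) × List (List Char)) (u : List Char) :
    List (List Char) × List (List Char) :=
  if u.head? = some '(' then (st.1 ++ [u], st.2)
  else (st.1 ++ [['(']], st.2 ++ [')' :: flipB ((u.drop 1).take (u.length - 2))])

def solution_altL (p : List Char) : List Char :=
  let chunks := chunksGo p 0 []
  let st := chunks.reverse.foldl stepB ([], [])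
  st.1.reverse.flatten ++ st.2.flatten

def solution_alt (p : String) : String := String.ofList (solution_altL p.toList)

-- ===== PRECONDITION & SPEC =====
def Spec_solution (p : String) (out : String) : Prop := out = solution_alt p
instance (p : String) (out : String) : Decidable (Spec_solution p out) := by unfold Spec_solution; infer_instance

-- ===== CLAIM (what is proved, stated in full; the proofs are below) =====
def Claim_equal_solution : Prop := ∀ (p : String), Dom_solution p → Spec_solution p (solution p)

-- ===== LEMMAS AND PROOFS =====

-- the right fold B's loop amounts to
def stepR (u r : List Char) : List Char :=
  if u.head? = some '(' then u ++ r
  else '(' :: r ++ ')' :: flipB ((u.drop 1).take (u.length - 2))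

def sumD : List Char → Int
  | [] => 0
  | c :: rest => (if c = '(' then 1 else -1) + sumD rest

def hitsZ : List Char → Int → Bool
  | [], _ => false
  | c :: rest, cnt =>
    let cnt' := cnt + (if c = '(' then 1 else -1)
    if cnt' = 0 then true else hitsZ rest cnt'

theorem checkOkA_cons (c : Char) (rest : List Char) (cnt : Int) :
    checkOkA (c :: rest) cnt =
      if cnt + (if c = '(' then 1 else -1) < 0 then false
      else checkOkA rest (cnt + (if c = '(' then 1 else -1)) := rfl

theorem hitsZ_cons (c : Char) (rest : List Char) (cnt : Int) :
    hitsZ (c :: rest) cnt =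
      if cnt + (if c = '(' then 1 else -1) = 0 then true
      else hitsZ rest (cnt + (if c = '(' then 1 else -1)) := rfl

theorem chunksGo_cons (c : Char) (rest : List Char) (cnt : Int) (cur : List Char) :
    chunksGo (c :: rest) cnt cur =
      if cnt + (if c = '(' then 1 else -1) = 0 then (c :: cur).reverse :: chunksGo rest 0 []
      else chunksGo rest (cnt + (if c = '(' then 1 else -1)) (c :: cur) := rfl

theorem delta_cases (c : Char) : (if c = '(' then (1:Int) else -1) = 1 ∨ (if c = '(' then (1:Int) else -1) = -1 := by
  split <;> simp

theorem hits_sum (p : List Char) : ∀ cnt, hitsZ p cnt = true →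
    cnt + sumD (p.take (splitIdx p cnt)) = 0 := by
  induction p with
  | nil => intro cnt h; simp [hitsZ] at h
  | cons c rest ih =>
    intro cnt h
    rw [hitsZ_cons] at h
    rw [splitIdx_cons]
    set d := (if c = '(' then (1:Int) else -1) with hd
    split
    · rename_i h0
      simp only [List.take_succ_cons, List.take_zero, sumD, ← hd]
      omega
    · rename_i h0
      rw [if_neg h0] at h
      simp only [List.take_succ_cons, sumD, ← hd]
      have := ih _ h
      omega

theorem nohits_len (p : List Char) : ∀ cnt, hitsZ p cnt = false → splitIdx p cnt = p.length := by
  induction p with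
  | nil => intro _ _; rfl
  | cons c rest ih =>
    intro cnt h
    rw [hitsZ_cons] at h
    rw [splitIdx_cons, List.length_cons]
    set d := (if c = '(' then (1:Int) else -1) with hd
    split
    · rename_i h0; rw [if_pos h0] at h; simp at h
    · rename_i h0; rw [if_neg h0] at h; rw [ih _ h]

theorem checkOkA_append (a : List Char) : ∀ (b : List Char) (cnt : Int),
    checkOkA (a ++ b) cnt = (checkOkA a cnt && checkOkA b (cnt + sumD a)) := by
  induction a with
  | nil => intro b cnt; simp [checkOkA, sumD]
  | cons c rest ih =>
    intro b cnt
    rw [List.cons_append, checkOkA_cons, checkOkA_cons]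
    set d := (if c = '(' then (1:Int) else -1) with hd
    simp only [sumD, ← hd]
    split
    · simp
    · rw [ih, ← add_assoc]

-- starting from a positive count, checkOk holds up to the first return to zero
theorem pos_ok (p : List Char) : ∀ cnt : Int, 1 ≤ cnt →
    checkOkA (p.take (splitIdx p cnt)) cnt = true := by
  induction p with
  | nil => intro cnt _; simp [splitIdx, checkOkA]
  | cons c rest ih =>
    intro cnt hc
    rw [splitIdx_cons]
    set d := (if c = '(' then (1:Int) else -1) with hd
    have hd1 := delta_cases c
    rw [← hd] at hd1
    split
    · rename_i h0
      simp only [List.take_succ_cons, List.take_zero]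
      rw [checkOkA_cons, ← hd, if_neg (by omega)]
      rfl
    · rename_i h0
      simp only [List.take_succ_cons]
      rw [checkOkA_cons, ← hd, if_neg (by omega)]
      exact ih _ (by omega)

-- chunksGo with its accumulator peels off exactly the first primitive chunk
theorem chunksGo_eq (p : List Char) : p ≠ [] → ∀ (cnt : Int) (cur : List Char),
    chunksGo p cnt cur =
      (cur.reverse ++ p.take (splitIdx p cnt)) :: chunksGo (p.drop (splitIdx p cnt)) 0 [] := by
  induction p with
  | nil => intro h; exact absurd rfl h
  | cons c rest ih =>
    intro _ cnt cur
    rw [chunksGo_cons, splitIdx_cons]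
    set d := (if c = '(' then (1:Int) else -1) with hd
    split
    · simp
    · cases rest with
      | nil => simp [chunksGo]
      | cons e rest' =>
        rw [ih (by simp) (cnt + d) (c :: cur)]
        simp

-- the (pre, suf) fold of B computes the same as a right fold of stepR
theorem fold_bridge (M : List (List Char)) : ∀ (pre suf : List (List Char)),
    ((M.foldl stepB (pre, suf)).1.reverse.flatten ++ (M.foldl stepB (pre, suf)).2.flatten)
      = M.foldl (fun r u => stepR u r) (pre.reverse.flatten ++ suf.flatten) := by
  induction M with
  | nil => intro pre suf; simp
  | cons u M ih =>
    intro pre suf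
    simp only [List.foldl_cons, stepB]
    split
    · rename_i h
      rw [ih]
      simp [stepR, h]
    · rename_i h
      rw [ih]
      simp [stepR, h]

theorem checkOk_head (c : Char) (rest : List Char) (h : checkOkA (c :: rest) 0 = true) : c = '(' := by
  by_contra hc
  rw [checkOkA_cons] at h
  simp [hc] at h

theorem take_head (c : Char) (rest : List Char) (k : Nat) (hk : 1 ≤ k) :
    ((c :: rest).take k).head? = some c := by
  cases k with
  | zero => omega
  | succ k => simp

-- checkOk of the first chunk is exactly "first char is '('"
theorem checkOk_chunk_pos (rest : List Char) :
    checkOkA (('(' :: rest).take (splitIdx ('(' :: rest) 0)) 0 = true := by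
  rw [splitIdx_cons]
  norm_num
  rw [checkOkA_cons]
  norm_num
  exact pos_ok rest 1 le_rfl

theorem checkOk_chunk_neg (c : Char) (rest : List Char) (hc : c ≠ '(') :
    checkOkA ((c :: rest).take (splitIdx (c :: rest) 0)) 0 = false := by
  rw [splitIdx_cons]
  rw [if_neg (by simp [hc])]
  simp only [List.take_succ_cons]
  rw [checkOkA_cons]
  simp [hc]

-- drop past the first chunk preserves checkOk
theorem checkOk_drop (p : List Char) (h : checkOkA p 0 = true) :
    checkOkA (p.drop (splitIdx p 0)) 0 = true := by
  cases hz : hitsZ p 0 with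
  | false => rw [nohits_len p 0 hz]; simp [checkOkA]
  | true =>
    have hsum := hits_sum p 0 hz
    have happ := checkOkA_append (p.take (splitIdx p 0)) (p.drop (splitIdx p 0)) 0
    rw [List.take_append_drop, h] at happ
    have hsum' : (0 : Int) + sumD (p.take (splitIdx p 0)) = 0 := by omega
    rw [hsum'] at happ
    exact (Bool.and_eq_true _ _ ▸ happ.symm).2

-- if checkOk holds, B's right fold over the chunks reassembles p itself
theorem foldr_ok (n : Nat) : ∀ p : List Char, p.length ≤ n → checkOkA p 0 = true →
    (chunksGo p 0 []).foldr stepR [] = p := by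
  induction n with
  | zero =>
    intro p hl _
    have : p = [] := List.length_eq_zero_iff.mp (by omega)
    subst this; rfl
  | succ n ih =>
    intro p hl hok
    cases p with
    | nil => rfl
    | cons c rest =>
      have hc : c = '(' := checkOk_head c rest hok
      rw [chunksGo_eq (c :: rest) (by simp) 0 []]
      simp only [List.reverse_nil, List.nil_append, List.foldr_cons]
      have hk := splitIdx_pos c rest 0
      rw [ih _ (by simp only [List.length_drop, List.length_cons] at *; omega)
            (checkOk_drop _ hok)]
      rw [stepR, if_pos (by rw [take_head c rest _ hk, hc])]
      exact List.take_append_drop _ _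

-- main: A's recursion equals B's right fold over the primitive chunks
theorem main_eq (n : Nat) : ∀ p : List Char, p.length ≤ n →
    solutionL p = (chunksGo p 0 []).foldr stepR [] := by
  induction n with
  | zero =>
    intro p hl
    have : p = [] := List.length_eq_zero_iff.mp (by omega)
    subst this
    rw [solutionL, dif_pos (by rfl)]; rfl
  | succ n ih =>
    intro p hl
    cases hok : checkOkA p 0 with
    | true =>
      rw [foldr_ok (n+1) p hl hok]
      rw [solutionL, dif_pos hok]
    | false =>
      cases p with
      | nil => simp [checkOkA] at hok
      | cons c rest =>
        rw [solutionL, dif_neg (by simp [hok])]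
        rw [chunksGo_eq (c :: rest) (by simp) 0 []]
        simp only [List.reverse_nil, List.nil_append, List.foldr_cons]
        have hk := splitIdx_pos c rest 0
        have hrec : solutionL ((c :: rest).drop (splitIdx (c :: rest) 0))
            = (chunksGo ((c :: rest).drop (splitIdx (c :: rest) 0)) 0 []).foldr stepR [] := by
          apply ih
          simp only [List.length_drop, List.length_cons] at *
          omega
        by_cases hc : c = '('
        · subst hc
          rw [if_pos (checkOk_chunk_pos rest)]
          rw [stepR, if_pos (by rw [take_head _ rest _ hk])]
          rw [hrec]
        · rw [if_neg (by simp [checkOk_chunk_neg c rest hc])]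
          rw [stepR, if_neg (by rw [take_head c rest _ hk]; simp [hc])]
          rw [hrec]
          rfl

theorem altL_eq (p : List Char) : solution_altL p = (chunksGo p 0 []).foldr stepR [] := by
  unfold solution_altL
  rw [fold_bridge]
  simp only [List.reverse_nil, List.flatten_nil, List.nil_append]
  rw [List.foldl_reverse]

-- ===== VERDICT (by name: the statement is the Claim_ definition above) =====
theorem solution_spec : Claim_equal_solution := by
  intro p _
  unfold Spec_solution solution solution_alt
  rw [altL_eq, main_eq (p.toList.length) p.toList le_rfl]
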